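-- pv_equiv track=rewrite | github.com/windowrainYOON/PBDA | problem#6.py | seq_overlap_counter
-- ===== SOURCE A (Python) =====
-- def seq_overlap_counter(seq1, seq2, kmer):
--   count_result = 0
--   maxkmer = ''
--   for i in range(0, len(seq1) - kmer):
--     if seq1[i:i+kmer] == seq2[i:i+kmer]:
--       count_result += 1
--       if len(maxkmer) < kmer: maxkmer = seq1[i:i+kmer]
--   return count_result, maxkmer
-- ===== SOURCE B (Python) =====
-- def seq_overlap_counter(seq1, seq2, kmer):
--     # O(n) sliding window: maintain the number of mismatching positions in the
--     # current window; a window matches iff that number is zero. (kmer >= 0.)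
--     n1, n2 = len(seq1), len(seq2)
--     limit = n1 - kmer
--     if limit <= 0:
--         return 0, ''
--
--     def mis(j):
--         # 1 if position j is a mismatch (a position past seq2's end mismatches)
--         return 0 if j < n2 and seq1[j] == seq2[j] else 1
--
--     bad = 0
--     for j in range(kmer):
--         bad += mis(j)
--     count = 0
--     first = -1
--     for i in range(limit):
--         if i > 0:
--             bad += mis(i + kmer - 1) - mis(i - 1)
--         if bad == 0:
--             count += 1
--             if first == -1:
--                 first = i
--     return count, (seq1[first:first + kmer] if first != -1 else '')
-- ===== Notes on version B (the rewrite author's own statement) =====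
-- stated objective: faster
-- what changed: A re-compares two kmer-length slices from scratch at every window (O(n*kmer)); B keeps a sliding count of mismatching positions in the current window, updating it by one add and one subtract per shift, and reconstructs the first matching window from its recorded index (O(n)).
-- outside the precondition, e.g. on seq_overlap_counter('ab', 'cd', -1): A returns (2, ''), B returns (3, 'a'); on seq_overlap_counter('abc', 'abc', -2): A returns (5, ''), B returns (4, 'a')
import Mathlib
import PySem

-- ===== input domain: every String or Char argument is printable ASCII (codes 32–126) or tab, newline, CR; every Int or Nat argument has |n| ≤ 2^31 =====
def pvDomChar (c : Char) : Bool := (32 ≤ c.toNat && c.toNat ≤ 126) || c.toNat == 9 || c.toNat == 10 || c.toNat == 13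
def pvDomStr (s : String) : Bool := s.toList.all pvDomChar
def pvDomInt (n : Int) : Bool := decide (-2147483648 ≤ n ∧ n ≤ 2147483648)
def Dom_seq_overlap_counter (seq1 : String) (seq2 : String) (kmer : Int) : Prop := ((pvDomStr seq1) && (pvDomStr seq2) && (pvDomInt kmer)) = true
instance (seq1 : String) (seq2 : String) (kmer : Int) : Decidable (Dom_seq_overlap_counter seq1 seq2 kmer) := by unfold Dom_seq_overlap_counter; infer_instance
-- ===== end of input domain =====

-- B replaces A's O(n·kmer) per-window slice comparison by an O(n) sliding count of
-- mismatching positions in the current window (objective: faster, asymptotic).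


-- ===== PORT A =====
def seq_overlap_counter (seq1 : String) (seq2 : String) (kmer : Int) : Int × String :=
  let l1 := seq1.toList
  let l2 := seq2.toList
  let r := (PySem.List.pyRange 0 ((l1.length : Int) - kmer) 1).foldl
    (fun (st : Int × List Char) i =>
      if PySem.List.slice l1 (some i) (some (i + kmer)) = PySem.List.slice l2 (some i) (some (i + kmer)) then
        (st.1 + 1,
          if (st.2.length : Int) < kmer then PySem.List.slice l1 (some i) (some (i + kmer)) else st.2)
      else st)
    (0, [])
  (r.1, String.ofList r.2)

-- ===== PORT B =====
-- mis(j) of Source B: 1 if position j mismatches (a position past seq2's end mismatches)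
def pvMis (l1 l2 : List Char) (j : Int) : Int :=
  if j < (l2.length : Int) ∧ PySem.List.pyGet? l1 j = PySem.List.pyGet? l2 j then 0 else 1

def seq_overlap_counter_alt (seq1 : String) (seq2 : String) (kmer : Int) : Int × String :=
  let l1 := seq1.toList
  let l2 := seq2.toList
  let n1 : Int := l1.length
  let limit := n1 - kmer
  if limit ≤ 0 then (0, "")
  else
    let bad0 := (PySem.List.pyRange 0 kmer 1).foldl (fun b j => b + pvMis l1 l2 j) 0
    let r := (PySem.List.pyRange 0 limit 1).foldl
      (fun (st : Int × Int × Int) i =>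
        let bad := if 0 < i then st.1 + pvMis l1 l2 (i + kmer - 1) - pvMis l1 l2 (i - 1) else st.1
        if bad = 0 then
          (bad, st.2.1 + 1, if st.2.2 = -1 then i else st.2.2)
        else (bad, st.2.1, st.2.2))
      (bad0, 0, -1)
    (r.2.1, if r.2.2 ≠ -1 then String.ofList (PySem.List.slice l1 (some r.2.2) (some (r.2.2 + kmer))) else "")

-- ===== PRECONDITION & SPEC =====
-- A negative k-mer length is outside the function's natural domain; A still returns there,
-- but only through Python's negative-slice wraparound (e.g. seq1[i:i+kmer] reading from the
-- end), so Pre_ restricts to nonnegative kmer.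
def Pre_seq_overlap_counter (seq1 : String) (seq2 : String) (kmer : Int) : Prop := 0 ≤ kmer
instance (seq1 : String) (seq2 : String) (kmer : Int) : Decidable (Pre_seq_overlap_counter seq1 seq2 kmer) := by unfold Pre_seq_overlap_counter; infer_instance
def pvWitness_seq_overlap_counter : String × String × Int := ("ab", "ab", 1)

def Spec_seq_overlap_counter (seq1 : String) (seq2 : String) (kmer : Int) (out : Int × String) : Prop := out = seq_overlap_counter_alt seq1 seq2 kmer
instance (seq1 : String) (seq2 : String) (kmer : Int) (out : Int × String) : Decidable (Spec_seq_overlap_counter seq1 seq2 kmer out) := by unfold Spec_seq_overlap_counter; infer_instance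

-- ===== CLAIM (what is proved, stated in full; the proofs are below) =====
def Claim_equal_seq_overlap_counter : Prop := ∀ (seq1 : String) (seq2 : String) (kmer : Int), Dom_seq_overlap_counter seq1 seq2 kmer → Pre_seq_overlap_counter seq1 seq2 kmer → Spec_seq_overlap_counter seq1 seq2 kmer (seq_overlap_counter seq1 seq2 kmer)

-- ===== LEMMAS AND PROOFS =====

abbrev pvCondB (l1 l2 : List Char) (j : Nat) : Prop := j < l2.length ∧ l1[j]? = l2[j]?

def pvW (l1 l2 : List Char) (k i : Nat) : Int :=
  ((List.range k).map (fun (d : Nat) => pvMis l1 l2 ((i : Int) + (d : Int)))).sum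

theorem pvMis_natCast (l1 l2 : List Char) (j : Nat) :
    pvMis l1 l2 (j : Int) = if pvCondB l1 l2 j then 0 else 1 := by
  simp [pvMis, pvCondB, PySem.List.pyGet?_natCast]

theorem pvMis_nonneg (l1 l2 : List Char) (j : Int) : 0 ≤ pvMis l1 l2 j := by
  unfold pvMis; split <;> norm_num

theorem pvSum01 (l1 l2 : List Char) (l : List Nat) :
    ((l.map (fun (j : Nat) => pvMis l1 l2 (j : Int))).sum = 0) ↔ ∀ j ∈ l, pvCondB l1 l2 j := by
  induction l with
  | nil => simp
  | cons x t ih =>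
    rw [List.map_cons, List.sum_cons]
    have hnn : 0 ≤ (t.map (fun (j : Nat) => pvMis l1 l2 (j : Int))).sum := by
      apply List.sum_nonneg; intro a ha
      obtain ⟨j, _, rfl⟩ := List.mem_map.mp ha
      exact pvMis_nonneg l1 l2 _
    have hx := pvMis_natCast l1 l2 x
    constructor
    · intro h
      by_cases hcx : pvCondB l1 l2 x
      · rw [hx, if_pos hcx, zero_add] at h
        intro j hj
        rcases List.mem_cons.mp hj with rfl | hj
        · exact hcx
        · exact ih.mp h j hj
      · rw [hx, if_neg hcx] at h; omega
    · intro h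
      rw [hx, if_pos (h x List.mem_cons_self), zero_add]
      exact ih.mpr (fun j hj => h j (List.mem_cons_of_mem _ hj))

theorem pvW_eq_sum (l1 l2 : List Char) (k i : Nat) :
    pvW l1 l2 k i = (((List.range k).map (fun d => i + d)).map (fun (j : Nat) => pvMis l1 l2 (j : Int))).sum := by
  unfold pvW
  rw [List.map_map]
  apply congrArg List.sum
  apply List.map_congr_left
  intro d _
  show pvMis l1 l2 ((i : Int) + (d : Int)) = pvMis l1 l2 ((i + d : Nat) : Int)
  norm_cast

theorem pvW_zero_iff (l1 l2 : List Char) (k i : Nat) :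
    pvW l1 l2 k i = 0 ↔ ∀ d < k, pvCondB l1 l2 (i + d) := by
  rw [pvW_eq_sum, pvSum01]
  constructor
  · intro h d hd
    exact h (i + d) (List.mem_map.mpr ⟨d, List.mem_range.mpr hd, rfl⟩)
  · intro h j hj
    obtain ⟨d, hd, rfl⟩ := List.mem_map.mp hj
    exact h d (List.mem_range.mp hd)

theorem pvCondA_iff (l1 l2 : List Char) (k i : Nat) (h : i + k ≤ l1.length) :
    (PySem.List.slice l1 (some (i : Int)) (some ((i : Int) + (k : Int))) =
     PySem.List.slice l2 (some (i : Int)) (some ((i : Int) + (k : Int)))) ↔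
    ∀ d < k, pvCondB l1 l2 (i + d) := by
  rw [PySem.List.slice_natCast_add, PySem.List.slice_natCast_add]
  constructor
  · intro he d hd
    have h1 : ((l1.drop i).take k)[d]? = ((l2.drop i).take k)[d]? := by rw [he]
    rw [List.getElem?_take_of_lt hd, List.getElem?_take_of_lt hd,
        List.getElem?_drop, List.getElem?_drop] at h1
    have hin : i + d < l1.length := by omega
    have h2 : l1[i+d]? = some l1[i+d] := List.getElem?_eq_getElem hin
    rw [h2] at h1
    have h3 : i + d < l2.length := by
      by_contra hcon
      rw [List.getElem?_eq_none (by omega)] at h1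
      simp at h1
    exact ⟨h3, by rw [h2, h1]⟩
  · intro hc
    apply List.ext_getElem?
    intro d
    by_cases hd : d < k
    · rw [List.getElem?_take_of_lt hd, List.getElem?_take_of_lt hd,
          List.getElem?_drop, List.getElem?_drop]
      exact (hc d hd).2
    · rw [List.getElem?_eq_none (le_trans (List.length_take_le _ _) (by omega)),
          List.getElem?_eq_none (le_trans (List.length_take_le _ _) (by omega))]

theorem pvW_succ (l1 l2 : List Char) (k a : Nat) :
    pvW l1 l2 k (a + 1) = pvW l1 l2 k a - pvMis l1 l2 ((a : Nat) : Int) + pvMis l1 l2 ((a + k : Nat) : Int) := by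
  have h1 : ((List.range (k+1)).map (fun (d : Nat) => pvMis l1 l2 ((a : Int) + (d : Int)))).sum
      = pvW l1 l2 k a + pvMis l1 l2 ((a : Int) + (k : Int)) := by
    rw [List.range_succ, List.map_append, List.sum_append]
    simp [pvW]
  have h2 : ((List.range (k+1)).map (fun (d : Nat) => pvMis l1 l2 ((a : Int) + (d : Int)))).sum
      = pvMis l1 l2 ((a : Int)) + pvW l1 l2 k (a + 1) := by
    rw [List.range_succ_eq_map, List.map_cons, List.sum_cons, List.map_map]
    have hh : ((List.range k).map ((fun (d : Nat) => pvMis l1 l2 ((a : Int) + (d : Int))) ∘ Nat.succ)).sum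
        = pvW l1 l2 k (a + 1) := by
      unfold pvW
      apply congrArg List.sum
      apply List.map_congr_left
      intro d _
      show pvMis l1 l2 ((a : Int) + ((Nat.succ d : Nat) : Int)) = _
      congr 1
      push_cast
      ring
    rw [hh]
    norm_num
  have e1 : ((a + k : Nat) : Int) = (a : Int) + (k : Int) := by push_cast; ring
  have e2 : ((a : Nat) : Int) = (a : Int) := rfl
  rw [e1, e2]
  omega

theorem pvWstep (l1 l2 : List Char) (k s : Nat) (hs : 1 ≤ s) :
    pvW l1 l2 k (s - 1) + pvMis l1 l2 ((s : Int) + (k : Int) - 1) - pvMis l1 l2 ((s : Int) - 1)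
      = pvW l1 l2 k s := by
  obtain ⟨a, rfl⟩ : ∃ a, s = a + 1 := ⟨s - 1, by omega⟩
  have e1 : ((a + 1 : Nat) : Int) + (k : Int) - 1 = ((a + k : Nat) : Int) := by push_cast; ring
  have e2 : ((a + 1 : Nat) : Int) - 1 = ((a : Nat) : Int) := by push_cast; ring
  rw [e1, e2, Nat.add_sub_cancel, pvW_succ]
  ring

def pvCnt (l1 l2 : List Char) (k : Nat) (L : List Nat) : Nat :=
  L.countP (fun j => decide (pvW l1 l2 k j = 0))

def pvFirst (l1 l2 : List Char) (k : Nat) (L : List Nat) : Option Nat :=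
  (L.filter (fun j => decide (pvW l1 l2 k j = 0))).head?

theorem pvAloop (l1 l2 : List Char) (k : Nat) (hk : 0 < k) :
    ∀ (m s : Nat) (c : Int) (mx : List Char), s + m + k ≤ l1.length → (mx = [] ∨ mx.length = k) →
    ((List.range' s m).map (fun (j : Nat) => (j : Int))).foldl
      (fun (st : Int × List Char) i =>
        if PySem.List.slice l1 (some i) (some (i + (k : Int))) = PySem.List.slice l2 (some i) (some (i + (k : Int))) then
          (st.1 + 1, if (st.2.length : Int) < (k : Int) then PySem.List.slice l1 (some i) (some (i + (k : Int))) else st.2)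
        else st) (c, mx)
    = (c + (pvCnt l1 l2 k (List.range' s m) : Int),
       if mx = [] then
         (match pvFirst l1 l2 k (List.range' s m) with
          | none => mx
          | some j => (l1.drop j).take k)
       else mx) := by
  intro m
  induction m with
  | zero =>
    intro s c mx h hmx
    simp [pvCnt, pvFirst]
  | succ n ih =>
    intro s c mx h hmx
    rw [List.range'_succ, List.map_cons, List.foldl_cons]
    have hsk : s + k ≤ l1.length := by omega
    have hcond : (PySem.List.slice l1 (some (s : Int)) (some ((s : Int) + (k : Int))) =
        PySem.List.slice l2 (some (s : Int)) (some ((s : Int) + (k : Int)))) ↔ pvW l1 l2 k s = 0 := by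
      rw [pvCondA_iff l1 l2 k s hsk, pvW_zero_iff]
    by_cases hc : pvW l1 l2 k s = 0
    · rw [if_pos (hcond.mpr hc)]
      have hcntc : pvCnt l1 l2 k (s :: List.range' (s+1) n) = pvCnt l1 l2 k (List.range' (s+1) n) + 1 := by
        simp [pvCnt, hc]
      have hfstc : pvFirst l1 l2 k (s :: List.range' (s+1) n) = some s := by
        simp [pvFirst, hc]
      rcases hmx with rfl | hlen
      · rw [if_pos (by simp; omega)]
        have hsl : PySem.List.slice l1 (some (s : Int)) (some ((s : Int) + (k : Int))) = (l1.drop s).take k :=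
          PySem.List.slice_natCast_add l1 s k
        rw [hsl]
        have hlen' : ((l1.drop s).take k).length = k := by
          rw [List.length_take, List.length_drop]; omega
        rw [ih (s+1) (c+1) _ (by omega) (Or.inr hlen')]
        have hne : (l1.drop s).take k ≠ [] := by
          intro hcon; rw [hcon] at hlen'; simp at hlen'; omega
        rw [if_neg hne, hcntc, hfstc]
        rw [if_pos rfl]
        simp only [Prod.mk.injEq]
        exact ⟨by push_cast; ring, trivial⟩
      · rw [if_neg (by rw [hlen]; omega)]
        rw [ih (s+1) (c+1) mx (by omega) (Or.inr hlen)]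
        have hne : mx ≠ [] := by intro hcon; rw [hcon] at hlen; simp at hlen; omega
        rw [if_neg hne, if_neg hne, hcntc]
        simp only [Prod.mk.injEq]
        exact ⟨by push_cast; ring, trivial⟩
    · rw [if_neg (fun hcon => hc (hcond.mp hcon))]
      rw [ih (s+1) c mx (by omega) hmx]
      have hcntc : pvCnt l1 l2 k (s :: List.range' (s+1) n) = pvCnt l1 l2 k (List.range' (s+1) n) := by
        simp [pvCnt, hc]
      have hfstc : pvFirst l1 l2 k (s :: List.range' (s+1) n) = pvFirst l1 l2 k (List.range' (s+1) n) := by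
        simp [pvFirst, hc]
      rw [hcntc, hfstc]

theorem pvBloop (l1 l2 : List Char) (k : Nat) :
    ∀ (m s : Nat) (c f : Int), 1 ≤ s → (0 ≤ f ∨ f = -1) →
    ((List.range' s m).map (fun (j : Nat) => (j : Int))).foldl
      (fun (st : Int × Int × Int) i =>
        let bad := if 0 < i then st.1 + pvMis l1 l2 (i + (k : Int) - 1) - pvMis l1 l2 (i - 1) else st.1
        if bad = 0 then (bad, st.2.1 + 1, if st.2.2 = -1 then i else st.2.2)
        else (bad, st.2.1, st.2.2)) (pvW l1 l2 k (s - 1), c, f)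
    = (pvW l1 l2 k (s + m - 1), c + (pvCnt l1 l2 k (List.range' s m) : Int),
       if f = -1 then
         (match pvFirst l1 l2 k (List.range' s m) with
          | none => (-1 : Int)
          | some j => (j : Int))
       else f) := by
  intro m
  induction m with
  | zero =>
    intro s c f hs hf
    simp [pvCnt, pvFirst]
  | succ n ih =>
    intro s c f hs hf
    rw [List.range'_succ, List.map_cons, List.foldl_cons]
    have hpos : (0 : Int) < (s : Int) := by exact_mod_cast hs
    have hbad : (if (0:Int) < (s:Int) then pvW l1 l2 k (s-1) + pvMis l1 l2 ((s:Int) + (k:Int) - 1) - pvMis l1 l2 ((s:Int) - 1) else pvW l1 l2 k (s-1)) = pvW l1 l2 k s := by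
      rw [if_pos hpos, pvWstep l1 l2 k s hs]
    simp only [hbad]
    have hs1 : s + 1 - 1 = s := by omega
    have hlen : s + 1 + n - 1 = s + (n + 1) - 1 := by omega
    by_cases hc : pvW l1 l2 k s = 0
    · rw [if_pos hc]
      have hcntc : pvCnt l1 l2 k (s :: List.range' (s+1) n) = pvCnt l1 l2 k (List.range' (s+1) n) + 1 := by
        simp [pvCnt, hc]
      have hfstc : pvFirst l1 l2 k (s :: List.range' (s+1) n) = some s := by
        simp [pvFirst, hc]
      rcases hf with hf0 | rfl
      · rw [if_neg (by omega)]
        rw [show pvW l1 l2 k s = pvW l1 l2 k (s + 1 - 1) from by rw [hs1]]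
        rw [ih (s+1) (c+1) f (by omega) (Or.inl hf0)]
        rw [if_neg (by omega), if_neg (by omega), hcntc, hlen]
        simp only [Prod.mk.injEq]
        refine ⟨trivial, by push_cast; ring, trivial⟩
      · rw [if_pos rfl]
        rw [show pvW l1 l2 k s = pvW l1 l2 k (s + 1 - 1) from by rw [hs1]]
        rw [ih (s+1) (c+1) (s : Int) (by omega) (Or.inl (by positivity))]
        rw [if_neg (by omega), if_pos rfl, hcntc, hfstc, hlen]
        simp only [Prod.mk.injEq]
        refine ⟨trivial, by push_cast; ring, trivial⟩
    · rw [if_neg hc]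
      have hcntc : pvCnt l1 l2 k (s :: List.range' (s+1) n) = pvCnt l1 l2 k (List.range' (s+1) n) := by
        simp [pvCnt, hc]
      have hfstc : pvFirst l1 l2 k (s :: List.range' (s+1) n) = pvFirst l1 l2 k (List.range' (s+1) n) := by
        simp [pvFirst, hc]
      rw [show pvW l1 l2 k s = pvW l1 l2 k (s + 1 - 1) from by rw [hs1]]
      rw [ih (s+1) c f (by omega) hf]
      rw [hcntc, hfstc, hlen]

theorem pvAzero (l1 l2 : List Char) :
    ∀ (m s : Nat) (c : Int) (mx : List Char),
    ((List.range' s m).map (fun (j : Nat) => (j : Int))).foldl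
      (fun (st : Int × List Char) i =>
        if PySem.List.slice l1 (some i) (some (i + ((0:Nat) : Int))) = PySem.List.slice l2 (some i) (some (i + ((0:Nat) : Int))) then
          (st.1 + 1, if (st.2.length : Int) < ((0:Nat) : Int) then PySem.List.slice l1 (some i) (some (i + ((0:Nat) : Int))) else st.2)
        else st) (c, mx)
    = (c + (m : Int), mx) := by
  intro m
  induction m with
  | zero => intro s c mx; simp
  | succ n ih =>
    intro s c mx
    rw [List.range'_succ, List.map_cons, List.foldl_cons]
    rw [if_pos (by rw [PySem.List.slice_natCast_add l1 s 0, PySem.List.slice_natCast_add l2 s 0]; simp)]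
    rw [if_neg (by simp)]
    rw [ih (s+1) (c+1) mx]
    simp only [Prod.mk.injEq]
    exact ⟨by push_cast; ring, trivial⟩

theorem pvBzero (l1 l2 : List Char) :
    ∀ (m s : Nat) (c f : Int),
    ((List.range' s m).map (fun (j : Nat) => (j : Int))).foldl
      (fun (st : Int × Int × Int) i =>
        let bad := if 0 < i then st.1 + pvMis l1 l2 (i + ((0:Nat) : Int) - 1) - pvMis l1 l2 (i - 1) else st.1
        if bad = 0 then (bad, st.2.1 + 1, if st.2.2 = -1 then i else st.2.2)
        else (bad, st.2.1, st.2.2)) (0, c, f)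
    = (0, c + (m : Int), if m = 0 then f else if f = -1 then (s : Int) else f) := by
  intro m
  induction m with
  | zero => intro s c f; simp
  | succ n ih =>
    intro s c f
    rw [List.range'_succ, List.map_cons, List.foldl_cons]
    have hbad : (if (0:Int) < (s:Int) then (0:Int) + pvMis l1 l2 ((s : Int) + ((0:Nat) : Int) - 1) - pvMis l1 l2 ((s : Int) - 1) else 0) = 0 := by
      split
      · norm_num
      · rfl
    simp only [hbad, if_true]
    rw [ih (s+1) (c+1) (if f = -1 then (s : Int) else f)]
    have hf' : (if f = -1 then (s : Int) else f) = -1 → False := by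
      split
      · omega
      · intro h; omega
    simp only [Prod.mk.injEq]
    refine ⟨trivial, by push_cast; ring, ?_⟩
    by_cases hn : n = 0
    · simp [hn]
    · rw [if_neg hn, if_neg (fun h => hf' h)]
      simp

theorem pvRangeCast (b : Nat) :
    PySem.List.pyRange 0 (b : Int) 1 = (List.range b).map (fun (j : Nat) => (j : Int)) := by
  rw [PySem.List.pyRange_one]
  have h0 : (((b : Int)) - 0).toNat = b := by omega
  rw [h0]
  apply List.map_congr_left
  intro j _
  simp

theorem pvMain (seq1 seq2 : String) (k : Nat) :
    seq_overlap_counter seq1 seq2 (k : Int) = seq_overlap_counter_alt seq1 seq2 (k : Int) := by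
  unfold seq_overlap_counter seq_overlap_counter_alt
  dsimp only
  generalize seq1.toList = l1
  generalize seq2.toList = l2
  by_cases hlim : (l1.length : Int) - (k : Int) ≤ 0
  · have hA : PySem.List.pyRange 0 ((l1.length : Int) - (k : Int)) 1 = [] := by
      rw [PySem.List.pyRange_one]
      have h0 : (((l1.length : Int) - (k : Int)) - 0).toNat = 0 := by omega
      rw [h0]
      simp
    rw [if_pos hlim, hA]
    simp
  · have hkn : k < l1.length := by omega
    have hNcast : (l1.length : Int) - (k : Int) = ((l1.length - k : Nat) : Int) := by omega
    rw [if_neg hlim, hNcast, pvRangeCast, List.range_eq_range']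
    set N := l1.length - k with hN
    have hNpos : 0 < N := by omega
    by_cases hk0 : k = 0
    · subst hk0
      rw [pvAzero l1 l2 N 0 0 []]
      have hb0 : (PySem.List.pyRange 0 ((0:Nat) : Int) 1).foldl (fun b j => b + pvMis l1 l2 j) 0 = 0 := by
        rw [pvRangeCast]
        simp
      rw [hb0, pvBzero l1 l2 N 0 0 (-1)]
      rw [if_neg (by omega : ¬ N = 0), if_pos rfl]
      dsimp only
      rw [if_pos (show ((0:Nat) : Int) ≠ -1 from by norm_num), PySem.List.slice_natCast_add l1 0 0]
      simp
    · have hk : 0 < k := by omega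
      rw [pvAloop l1 l2 k hk N 0 0 [] (by omega) (Or.inl rfl)]
      have hb0 : (PySem.List.pyRange 0 ((k:Nat) : Int) 1).foldl (fun b j => b + pvMis l1 l2 j) 0 = pvW l1 l2 k 0 := by
        rw [pvRangeCast, List.foldl_map, PySem.List.foldl_add]
        unfold pvW
        rw [zero_add]
        apply congrArg List.sum
        apply List.map_congr_left
        intro d _
        simp
      rw [hb0]
      have hpeel : List.range' 0 N = 0 :: List.range' 1 (N - 1) := by
        rw [show N = (N - 1) + 1 from by omega, List.range'_succ]
        simp
      rw [hpeel, List.map_cons, List.foldl_cons]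
      dsimp only
      rw [if_neg (by norm_num : ¬ (0:Int) < ((0:Nat) : Int))]
      by_cases h0 : pvW l1 l2 k 0 = 0
      · rw [if_pos h0]
        rw [show (if (-1:Int) = -1 then ((0:Nat):Int) else -1) = ((0:Nat):Int) from if_pos rfl]
        have hB := pvBloop l1 l2 k (N-1) 1 (0+1) ((0:Nat):Int) (le_refl 1) (Or.inl (by norm_num))
        rw [show (1:Nat) - 1 = 0 from rfl] at hB
        rw [hB]
        rw [if_neg (show ¬ ((0:Nat):Int) = -1 from by norm_num)]
        have hcnt : pvCnt l1 l2 k (0 :: List.range' 1 (N-1)) = pvCnt l1 l2 k (List.range' 1 (N-1)) + 1 := by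
          simp [pvCnt, h0]
        have hfst : pvFirst l1 l2 k (0 :: List.range' 1 (N-1)) = some 0 := by
          simp [pvFirst, h0]
        rw [hcnt, hfst, if_pos rfl]
        rw [if_pos (show ((0:Nat):Int) ≠ -1 from by norm_num)]
        rw [PySem.List.slice_natCast_add l1 0 k]
        simp only [Prod.mk.injEq]
        exact ⟨by push_cast; ring, trivial⟩
      · rw [if_neg h0]
        have hB := pvBloop l1 l2 k (N-1) 1 0 (-1) (le_refl 1) (Or.inr rfl)
        rw [show (1:Nat) - 1 = 0 from rfl] at hB
        rw [hB]
        rw [if_pos (rfl : (-1:Int) = -1)]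
        have hcnt : pvCnt l1 l2 k (0 :: List.range' 1 (N-1)) = pvCnt l1 l2 k (List.range' 1 (N-1)) := by
          simp [pvCnt, h0]
        have hfst : pvFirst l1 l2 k (0 :: List.range' 1 (N-1)) = pvFirst l1 l2 k (List.range' 1 (N-1)) := by
          simp [pvFirst, h0]
        rw [hcnt, hfst, if_pos rfl]
        rcases hfo : pvFirst l1 l2 k (List.range' 1 (N-1)) with _ | j
        · rw [if_neg (show ¬ (-1:Int) ≠ -1 from by norm_num)]
        · rw [if_pos (show (j:Int) ≠ -1 from by omega)]
          rw [PySem.List.slice_natCast_add l1 j k]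

-- ===== VERDICT (by name: the statement is the Claim_ definition above) =====
theorem seq_overlap_counter_spec : Claim_equal_seq_overlap_counter := by
  intro seq1 seq2 kmer _ hpre
  unfold Spec_seq_overlap_counter
  have h0 : (0 : Int) ≤ kmer := hpre
  obtain ⟨k, rfl⟩ : ∃ kk : Nat, kmer = (kk : Int) := ⟨kmer.toNat, (Int.toNat_of_nonneg h0).symm⟩
  exact pvMain seq1 seq2 k
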